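-- pv_equiv track=rewrite | github.com/jakevoytko/advent2023 | 12/01.py | all_configurations
-- ===== SOURCE A (Python) =====
-- def prepend_all(prepend, springs):
--   if springs is None:
--     return []
--   ret = []
--   for s in springs:
--     ret.append(prepend + s)
--   return ret
--
-- def all_configurations(remaining, contiguous):
--   # Base cases
--   if remaining < 0:
--     return None
--   if len(contiguous) == 0:
--     return ['.' * remaining]
--   elif contiguous[0] > remaining:
--     return None
--
--   next = contiguous[1:]
--   ret = []
--   for i in range(remaining):
--     prefix = '.' * i + '#' * contiguous[0]
--     if remaining == len(prefix) and len(next) == 0: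
--       ret.append(prefix)
--     else:
--       ret.extend(prepend_all(prefix + '.', all_configurations(remaining - i - contiguous[0] - 1, next)))
--
--   return ret
-- ===== SOURCE B (Python) =====
-- def all_configurations(remaining, contiguous):
--   # Bottom-up tabulation: table[r] = configurations of width r for a suffix of
--   # the groups; each level is computed once instead of A's repeated recursion.
--   if remaining < 0:
--     return None
--   if len(contiguous) == 0:
--     return ['.' * remaining]
--   if contiguous[0] > remaining:
--     return None
--   table = build_table(contiguous[1:], remaining - contiguous[0] - 1)
--   return table_row(contiguous[0], remaining, table, len(contiguous) == 1)
--
-- def build_table(groups, bound):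
--   # table[r] (0 <= r <= bound) = all configurations of width r for `groups`
--   if len(groups) == 0:
--     return [['.' * r] for r in range(bound + 1)]
--   sub = build_table(groups[1:], bound - groups[0] - 1)
--   return [table_row(groups[0], r, sub, len(groups) == 1) for r in range(bound + 1)]
--
-- def table_row(c, r, table, last):
--   out = []
--   for i in range(r):
--     prefix = '.' * i + '#' * c
--     if last and r == len(prefix):
--       out.append(prefix)
--     else:
--       rem2 = r - i - c - 1
--       if rem2 >= 0:
--         out.extend(prefix + '.' + s for s in table[rem2])
--   return out
-- ===== Notes on version B (the rewrite author's own statement) =====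
-- stated objective: alternative
-- what changed: Replaces A's naive top-down recursion, which re-solves the same (width, group-suffix) subproblem many times, by a bottom-up dynamic-programming table (one row per width, one level per group suffix) computed once and looked up.
import Mathlib
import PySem

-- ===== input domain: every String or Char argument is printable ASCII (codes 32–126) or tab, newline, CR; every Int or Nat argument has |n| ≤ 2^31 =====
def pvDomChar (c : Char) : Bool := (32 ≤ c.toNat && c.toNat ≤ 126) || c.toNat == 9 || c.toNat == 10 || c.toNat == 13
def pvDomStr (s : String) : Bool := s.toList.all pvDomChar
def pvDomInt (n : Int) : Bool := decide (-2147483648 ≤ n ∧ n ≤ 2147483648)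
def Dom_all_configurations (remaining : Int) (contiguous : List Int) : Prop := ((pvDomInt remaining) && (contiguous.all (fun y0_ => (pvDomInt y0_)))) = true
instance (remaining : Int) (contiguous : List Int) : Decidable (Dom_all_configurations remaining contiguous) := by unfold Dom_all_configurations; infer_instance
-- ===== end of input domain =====

-- B replaces A's naive recursion over (remaining, suffix) by a bottom-up DP table per
-- group suffix (each subproblem computed once); return values proved identical.

-- shared string helpers: '.'*n and '#'*n (Python repetition: negative n gives '')
def pvDots (n : Int) : String := String.ofList (PySem.List.pyRepeat ['.'] n)
def pvHashes (n : Int) : String := String.ofList (PySem.List.pyRepeat ['#'] n)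
def pvLen (s : String) : Int := PySem.Str.len s

-- ===== PORT A =====
def prepend_all (prepend : String) (springs : Option (List String)) : List String :=
  match springs with
  | none => []
  | some l => l.foldl (fun ret s => ret ++ [prepend ++ s]) []

mutual
def all_configurations (remaining : Int) (contiguous : List Int) : Option (List String) :=
  if remaining < 0 then none
  else
    match contiguous with
    | [] => some [pvDots remaining]
    | c0 :: next =>
      if c0 > remaining then none
      else some (acLoop remaining c0 next (PySem.List.pyRange 0 remaining 1) [])
termination_by (contiguous.length + 1, 0)

-- the 'for i in range(remaining)' loop of A, with its accumulator ret
def acLoop (remaining c0 : Int) (next : List Int) (is : List Int) (ret : List String) : List String :=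
  match is with
  | [] => ret
  | i :: rest =>
    let pre := pvDots i ++ pvHashes c0
    if remaining = pvLen pre ∧ next = [] then
      acLoop remaining c0 next rest (ret ++ [pre])
    else
      acLoop remaining c0 next rest
        (ret ++ prepend_all (pre ++ ".") (all_configurations (remaining - i - c0 - 1) next))
termination_by (next.length + 1, is.length + 1)
end

-- ===== PORT B =====
-- table[r] = configurations of width r; table[rem2] is ported with getD: the index is
-- proved in range by the table sizing (build_table), so the default is never reached.
def table_row (c r : Int) (table : List (List String)) (last : Bool) : List String :=
  (PySem.List.pyRange 0 r 1).foldl (fun out i =>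
    let pre := pvDots i ++ pvHashes c
    if last = true ∧ r = pvLen pre then out ++ [pre]
    else
      let rem2 := r - i - c - 1
      if 0 ≤ rem2 then out ++ (PySem.List.pyGetD table rem2 []).map (fun s => (pre ++ ".") ++ s)
      else out) []

def build_table (groups : List Int) (bound : Int) : List (List String) :=
  match groups with
  | [] => (PySem.List.pyRange 0 (bound + 1) 1).map (fun r => [pvDots r])
  | c :: rest =>
    let sub := build_table rest (bound - c - 1)
    (PySem.List.pyRange 0 (bound + 1) 1).map (fun r => table_row c r sub rest.isEmpty)

def all_configurations_alt (remaining : Int) (contiguous : List Int) : Option (List String) :=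
  if remaining < 0 then none
  else
    match contiguous with
    | [] => some [pvDots remaining]
    | c0 :: next =>
      if c0 > remaining then none
      else some (table_row c0 remaining (build_table next (remaining - c0 - 1)) next.isEmpty)

-- ===== PRECONDITION & SPEC =====
def Spec_all_configurations (remaining : Int) (contiguous : List Int) (out : Option (List String)) : Prop := out = all_configurations_alt remaining contiguous
instance (remaining : Int) (contiguous : List Int) (out : Option (List String)) : Decidable (Spec_all_configurations remaining contiguous out) := by unfold Spec_all_configurations; infer_instance

-- ===== CLAIM (what is proved, stated in full; the proofs are below) =====
def Claim_equal_all_configurations : Prop := ∀ (remaining : Int) (contiguous : List Int), Dom_all_configurations remaining contiguous → Spec_all_configurations remaining contiguous (all_configurations remaining contiguous)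

-- ===== LEMMAS AND PROOFS =====

theorem prepend_all_eq (p : String) (o : Option (List String)) :
    prepend_all p o = (o.getD []).map (fun s => p ++ s) := by
  have aux : ∀ (l : List String) (acc : List String),
      l.foldl (fun ret s => ret ++ [p ++ s]) acc = acc ++ l.map (fun s => p ++ s) := by
    intro l
    induction l with
    | nil => simp
    | cons x xs ih => intro acc; simp [List.foldl, ih]
  cases o with
  | none => simp [prepend_all]
  | some l => simp [prepend_all, aux]

theorem len_pre (i c : Int) :
    pvLen (pvDots i ++ pvHashes c) = (i.toNat : Int) + (c.toNat : Int) := by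
  simp [pvLen, PySem.Str.len, pvDots, pvHashes, PySem.List.pyRepeat_singleton]

theorem ac_neg (r : Int) (s : List Int) (h : r < 0) : all_configurations r s = none := by
  rw [all_configurations.eq_def]
  simp [h]

theorem ac_nil (r : Int) (h : ¬ r < 0) : all_configurations r [] = some [pvDots r] := by
  rw [all_configurations.eq_def, if_neg h]

theorem ac_cons (r c : Int) (s : List Int) (h : ¬ r < 0) :
    all_configurations r (c :: s) =
      if c > r then none else some (acLoop r c s (PySem.List.pyRange 0 r 1) []) := by
  rw [all_configurations.eq_def, if_neg h]

theorem row_eq (c r : Int) (s : List Int) (t : List (List String)) (hr : 0 ≤ r)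
    (ht : ∀ r' : Int, 0 ≤ r' → r' + c + 1 ≤ r →
      PySem.List.pyGetD t r' [] = (all_configurations r' s).getD []) :
    table_row c r t s.isEmpty = (all_configurations r (c :: s)).getD [] := by
  have hmem : ∀ i ∈ PySem.List.pyRange 0 r 1, 0 ≤ i ∧ i < r := by
    intro i hi
    exact PySem.List.mem_pyRange_one.mp hi
  rw [ac_cons r c s (not_lt.mpr hr)]
  by_cases hc : c > r
  · -- A returns None (flattened to []); every loop iteration of B contributes nothing
    rw [if_pos hc]
    unfold table_row
    have aux : ∀ (is : List Int), (∀ i ∈ is, 0 ≤ i ∧ i < r) → ∀ acc : List String,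
        is.foldl (fun out i =>
          let pre := pvDots i ++ pvHashes c
          if s.isEmpty = true ∧ r = pvLen pre then out ++ [pre]
          else
            let rem2 := r - i - c - 1
            if 0 ≤ rem2 then out ++ (PySem.List.pyGetD t rem2 []).map (fun s => (pre ++ ".") ++ s)
            else out) acc = acc := by
      intro is
      induction is with
      | nil => intro _ acc; simp
      | cons i rest ih =>
        intro his acc
        have hi := his i (by simp)
        have hlen := len_pre i c
        have hne : ¬ (s.isEmpty = true ∧ r = pvLen (pvDots i ++ pvHashes c)) := by
          rintro ⟨-, h2⟩
          rw [hlen] at h2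
          omega
        have hrem : ¬ (0 ≤ r - i - c - 1) := by omega
        simp only [List.foldl]
        rw [if_neg hne, if_neg hrem]
        exact ih (fun j hj => his j (by simp [hj])) acc
    exact aux _ hmem []
  · -- main case: the loop bodies agree element by element
    rw [if_neg hc, Option.getD_some]
    unfold table_row
    have aux : ∀ (is : List Int), (∀ i ∈ is, 0 ≤ i ∧ i < r) → ∀ acc : List String,
        is.foldl (fun out i =>
          let pre := pvDots i ++ pvHashes c
          if s.isEmpty = true ∧ r = pvLen pre then out ++ [pre]
          else
            let rem2 := r - i - c - 1
            if 0 ≤ rem2 then out ++ (PySem.List.pyGetD t rem2 []).map (fun s => (pre ++ ".") ++ s)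
            else out) acc = acLoop r c s is acc := by
      intro is
      induction is with
      | nil => intro _ acc; simp [acLoop]
      | cons i rest ih =>
        intro his acc
        have hi := his i (by simp)
        have hrest : ∀ j ∈ rest, 0 ≤ j ∧ j < r := fun j hj => his j (by simp [hj])
        rw [acLoop]
        simp only [List.foldl]
        have hiff : (s.isEmpty = true ∧ r = pvLen (pvDots i ++ pvHashes c)) ↔
            (r = pvLen (pvDots i ++ pvHashes c) ∧ s = []) := by
          constructor
          · rintro ⟨h1, h2⟩; exact ⟨h2, List.isEmpty_iff.mp h1⟩
          · rintro ⟨h1, h2⟩; exact ⟨List.isEmpty_iff.mpr h2, h1⟩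
        by_cases hcond : r = pvLen (pvDots i ++ pvHashes c) ∧ s = []
        · rw [if_pos (hiff.mpr hcond), if_pos hcond]
          exact ih hrest _
        · rw [if_neg (fun h => hcond (hiff.mp h)), if_neg hcond]
          by_cases hrem : 0 ≤ r - i - c - 1
          · rw [if_pos hrem]
            have := ht (r - i - c - 1) hrem (by omega)
            rw [prepend_all_eq, this]
            exact ih hrest _
          · rw [if_neg hrem]
            have : all_configurations (r - i - c - 1) s = none := ac_neg _ _ (by omega)
            rw [prepend_all_eq, this]
            simp only [Option.getD_none, List.map_nil, List.append_nil]
            exact ih hrest _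
    exact aux _ hmem []

theorem build_table_eq : ∀ (s : List Int) (bound r' : Int), 0 ≤ r' → r' ≤ bound →
    PySem.List.pyGetD (build_table s bound) r' [] = (all_configurations r' s).getD [] := by
  intro s
  induction s with
  | nil =>
    intro bound r' h0 hb
    rw [build_table]
    rw [PySem.List.pyGetD_map_pyRange_of_nonneg _ _ _ _ h0 (by omega)]
    rw [ac_nil r' (not_lt.mpr h0), Option.getD_some]
  | cons c rest ih =>
    intro bound r' h0 hb
    rw [build_table]
    rw [PySem.List.pyGetD_map_pyRange_of_nonneg _ _ _ _ h0 (by omega)]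
    exact row_eq c r' rest _ h0 (fun r'' h0' hle => ih _ r'' h0' (by omega))

-- ===== VERDICT (by name: the statement is the Claim_ definition above) =====
theorem all_configurations_spec : Claim_equal_all_configurations := by
  intro remaining contiguous _
  unfold Spec_all_configurations
  by_cases hneg : remaining < 0
  · rw [ac_neg _ _ hneg]
    simp [all_configurations_alt, hneg]
  · cases contiguous with
    | nil =>
      rw [ac_nil _ hneg]
      simp [all_configurations_alt, hneg]
    | cons c0 next =>
      rw [ac_cons _ _ _ hneg]
      by_cases hc : c0 > remaining
      · simp [all_configurations_alt, hneg, hc]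
      · rw [if_neg hc]
        have hrow := row_eq c0 remaining next (build_table next (remaining - c0 - 1))
          (not_lt.mp hneg)
          (fun r' h0 hle => build_table_eq next (remaining - c0 - 1) r' h0 (by omega))
        rw [ac_cons _ _ _ hneg, if_neg hc, Option.getD_some] at hrow
        simp [all_configurations_alt, hneg, hc, hrow]
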